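-- pv_equiv track=rewrite | github.com/clxxrlove/algorithm-study-py | programmers/2024-kakao-internship/1.py | solution
-- ===== SOURCE A (Python) =====
-- def solution(friends, gifts):
--     length = len(friends)
--     answer = [0] * length
--     graph = [[0] * length for _ in range(length)]
--     gift_point = [0] * length
--     friends = dict((friend, i) for i, friend in enumerate(friends))
--
--     for gift in gifts:
--         x, y = gift.split()
--         gift_point[friends[x]] += 1
--         gift_point[friends[y]] -= 1
--         graph[friends[x]][friends[y]] += 1
--
--     for i in range(length):
--         for j in range(i + 1, length):
--             if graph[i][j] > graph[j][i]:
--                 answer[i] += 1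
--             elif graph[i][j] < graph[j][i]:
--                 answer[j] += 1
--             else:
--                 if gift_point[i] > gift_point[j]:
--                     answer[i] += 1
--                 elif gift_point[i] < gift_point[j]:
--                     answer[j] += 1
--
--     return max(answer)
-- ===== SOURCE B (Python) =====
-- def solution(friends, gifts):
--     n = len(friends)
--     idx = {f: i for i, f in enumerate(friends)}
--     pairs = [(idx[x], idx[y]) for x, y in (gift.split() for gift in gifts)]
--
--     def point(i):
--         return sum(1 for a, _ in pairs if a == i) - sum(1 for _, b in pairs if b == i)
--
--     def beats(i, j):
--         gij = sum(1 for p in pairs if p == (i, j))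
--         gji = sum(1 for p in pairs if p == (j, i))
--         if gij != gji:
--             return gij > gji
--         return point(i) > point(j)
--
--     return max(sum(1 for j in range(n) if j != i and beats(i, j)) for i in range(n))
-- ===== Notes on version B (the rewrite author's own statement) =====
-- stated objective: simpler
-- what changed: Replaces A's adjacency matrix, inline gift_point array and triangular loop that updates both winners' answer slots with a flat parse of gifts into an index-pair list plus direct per-person win counting by comprehensions (count of j beaten by i), returning max over a generator; no answer array or matrix is maintained.
import Mathlib
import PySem

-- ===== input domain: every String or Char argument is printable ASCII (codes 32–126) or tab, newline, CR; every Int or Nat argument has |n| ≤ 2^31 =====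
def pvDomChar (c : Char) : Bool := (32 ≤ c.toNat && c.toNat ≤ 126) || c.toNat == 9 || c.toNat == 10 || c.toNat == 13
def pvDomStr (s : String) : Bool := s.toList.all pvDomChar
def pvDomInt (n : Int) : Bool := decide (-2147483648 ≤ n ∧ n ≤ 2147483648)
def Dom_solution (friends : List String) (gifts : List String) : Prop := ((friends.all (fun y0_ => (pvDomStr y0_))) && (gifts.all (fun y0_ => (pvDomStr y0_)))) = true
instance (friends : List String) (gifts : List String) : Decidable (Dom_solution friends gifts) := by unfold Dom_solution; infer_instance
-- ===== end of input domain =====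

-- B replaces A's adjacency matrix, inline gift_point array and triangular dual-update loop with a
-- flat parsed pair list and direct per-person win counting (a simpler decomposition; not faster).

-- ===== PORT A =====
-- dict((friend, i) for i, friend in enumerate(friends))   (both sources build this same dict)
def pvFriendIdx (friends : List String) : PySem.Dict String Int :=
  (PySem.List.enumerate friends 0).foldl (fun d p => d.insert p.2 p.1) PySem.Dict.empty

-- one iteration of "for gift in gifts", state = (gift_point, graph)
def pvGiftStepA (fr : PySem.Dict String Int) (st : List Int × List (List Int)) (gift : String) :
    List Int × List (List Int) :=
  match PySem.Str.split₀ gift with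
  | [x, y] =>
      let i := (fr.getD x 0).toNat   -- dict values are enumerate indices ≥ 0 (.toNat exact there); a missing key raises KeyError in Python (outside Pre_)
      let j := (fr.getD y 0).toNat
      ((st.1.modify i (· + 1)).modify j (· - 1),
       st.2.modify i (fun row => row.modify j (· + 1)))
  | _ => st   -- Python raises ValueError on unpacking here; excluded by Pre_

-- body of the inner "for j in range(i+1, length)" loop
def pvPairStepA (graph : List (List Int)) (giftPoint : List Int) (i : Int)
    (answer : List Int) (j : Int) : List Int :=
  let gij := PySem.List.pyGetD (PySem.List.pyGetD graph i []) j 0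
  let gji := PySem.List.pyGetD (PySem.List.pyGetD graph j []) i 0
  if gij > gji then answer.modify i.toNat (· + 1)
  else if gij < gji then answer.modify j.toNat (· + 1)
  else if PySem.List.pyGetD giftPoint i 0 > PySem.List.pyGetD giftPoint j 0 then
    answer.modify i.toNat (· + 1)
  else if PySem.List.pyGetD giftPoint i 0 < PySem.List.pyGetD giftPoint j 0 then
    answer.modify j.toNat (· + 1)
  else answer

def solution (friends : List String) (gifts : List String) : Int :=
  let length := friends.length
  let answer0 := List.replicate length (0 : Int)
  let graph0 := List.replicate length (List.replicate length (0 : Int))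
  let giftPoint0 := List.replicate length (0 : Int)
  let fr := pvFriendIdx friends
  let st := gifts.foldl (pvGiftStepA fr) (giftPoint0, graph0)
  let answer := (PySem.List.pyRange 0 length 1).foldl
    (fun ans i => (PySem.List.pyRange (i + 1) length 1).foldl (pvPairStepA st.2 st.1 i) ans)
    answer0
  (PySem.List.max? answer (fun v => v)).getD 0

-- ===== PORT B =====
-- (idx[x], idx[y]) for the two words of one gift
def pvParseB (idx : PySem.Dict String Int) (gift : String) : Int × Int :=
  match PySem.Str.split₀ gift with
  | [x, y] => (idx.getD x 0, idx.getD y 0)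
  | _ => (0, 0)   -- Python raises here; excluded by Pre_

def pvPairsB (idx : PySem.Dict String Int) (gifts : List String) : List (Int × Int) :=
  gifts.map (pvParseB idx)

-- sum(1 for a,_ in pairs if a == i) - sum(1 for _,b in pairs if b == i)
def pvPointB (pairs : List (Int × Int)) (i : Int) : Int :=
  (pairs.countP (fun p => p.1 == i) : Int) - (pairs.countP (fun p => p.2 == i) : Int)

def pvBeatsB (pairs : List (Int × Int)) (i j : Int) : Bool :=
  let gij : Int := pairs.countP (fun p => p == (i, j))
  let gji : Int := pairs.countP (fun p => p == (j, i))
  if gij ≠ gji then gij > gji else pvPointB pairs i > pvPointB pairs j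

def solution_alt (friends : List String) (gifts : List String) : Int :=
  let n := friends.length
  let pairs := pvPairsB (pvFriendIdx friends) gifts
  let wins := (PySem.List.pyRange 0 n 1).map
    (fun i => ((PySem.List.pyRange 0 n 1).countP (fun j => j != i && pvBeatsB pairs i j) : Int))
  (PySem.List.max? wins (fun v => v)).getD 0

-- ===== PRECONDITION & SPEC =====
-- Pre_ excludes exactly the inputs on which A raises: empty friends (max([]) → ValueError), a gift
-- that does not split into exactly two words (ValueError) or that names an unknown friend (KeyError).
def Pre_solution (friends : List String) (gifts : List String) : Prop :=
  friends ≠ [] ∧ ∀ g ∈ gifts,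
    (PySem.Str.split₀ g).length = 2 ∧ ∀ w ∈ PySem.Str.split₀ g, w ∈ friends
instance (friends : List String) (gifts : List String) : Decidable (Pre_solution friends gifts) := by
  unfold Pre_solution; infer_instance
def pvWitness_solution : List String × List String := (["a", "b"], ["a b", "b a", "a b"])

def Spec_solution (friends : List String) (gifts : List String) (out : Int) : Prop :=
  out = solution_alt friends gifts
instance (friends : List String) (gifts : List String) (out : Int) :
    Decidable (Spec_solution friends gifts out) := by unfold Spec_solution; infer_instance

-- ===== CLAIM (what is proved, stated in full; the proofs are below) =====
def Claim_equal_solution : Prop := ∀ (friends : List String) (gifts : List String),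
  Dom_solution friends gifts → Pre_solution friends gifts →
  Spec_solution friends gifts (solution friends gifts)

-- ===== LEMMAS AND PROOFS =====

-- proof-side: the gift loop seen on parsed pairs
def pvGiftPairStep (st : List Int × List (List Int)) (p : Int × Int) :
    List Int × List (List Int) :=
  ((st.1.modify p.1.toNat (· + 1)).modify p.2.toNat (· - 1),
   st.2.modify p.1.toNat (fun row => row.modify p.2.toNat (· + 1)))

-- proof-side: the triangular-loop body seen through pvBeatsB
def pvPairStep2 (pairs : List (Int × Int)) (ans : List Int) (p : Int × Int) : List Int :=
  if pvBeatsB pairs p.1 p.2 then ans.modify p.1.toNat (· + 1)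
  else if pvBeatsB pairs p.2 p.1 then ans.modify p.2.toNat (· + 1)
  else ans

-- proof-side: does processing pair p bump answer slot k?
def pvTgtEq (pairs : List (Int × Int)) (p : Int × Int) (k : Nat) : Bool :=
  if pvBeatsB pairs p.1 p.2 then p.1 == (k : Int)
  else if pvBeatsB pairs p.2 p.1 then p.2 == (k : Int)
  else false

lemma pv_getD_modify {α : Type} (l : List α) (i k : Nat) (f : α → α) (d : α) (hk : k < l.length) :
    (l.modify i f).getD k d = if i = k then f (l.getD k d) else l.getD k d := by
  rw [List.getD_eq_getElem l d hk,
      List.getD_eq_getElem _ d (by simpa using hk),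
      List.getElem_modify]

lemma pv_beats_excl (pairs : List (Int × Int)) (i j : Int) :
    pvBeatsB pairs i j = true → pvBeatsB pairs j i = false := by
  simp only [pvBeatsB]
  intro h
  split_ifs at h ⊢ with h1 h2 <;> simp_all <;> omega

lemma pv_step2_fold (pairs : List (Int × Int)) (L : List (Int × Int))
    (hL : ∀ p ∈ L, ∃ a b : Nat, p = ((a : Int), (b : Int))) :
    ∀ ans : List Int, ∀ k : Nat, k < ans.length →
      ((L.foldl (pvPairStep2 pairs) ans).getD k 0
          = ans.getD k 0 + (L.countP (fun p => pvTgtEq pairs p k) : Int)) ∧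
      (L.foldl (pvPairStep2 pairs) ans).length = ans.length := by
  induction L with
  | nil => intro ans k hk; simp
  | cons p t ih =>
    intro ans k hk
    obtain ⟨a, b, rfl⟩ := hL p (List.mem_cons_self ..)
    have ht : ∀ q ∈ t, ∃ a b : Nat, q = ((a : Int), (b : Int)) :=
      fun q hq => hL q (List.mem_cons_of_mem _ hq)
    have hstep : (pvPairStep2 pairs ans ((a : Int), (b : Int))).length = ans.length := by
      simp only [pvPairStep2]; split_ifs <;> simp
    have ih' := (ih ht) (pvPairStep2 pairs ans ((a : Int), (b : Int))) k (by omega)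
    refine ⟨?_, by simpa [hstep] using ih'.2⟩
    rw [List.foldl_cons, ih'.1]
    simp only [List.countP_cons]
    by_cases h1 : pvBeatsB pairs (a : Int) (b : Int) = true
    · have hstep' : pvPairStep2 pairs ans ((a : Int), (b : Int)) = ans.modify a (· + 1) := by
        simp [pvPairStep2, h1]
      have htgt : pvTgtEq pairs ((a : Int), (b : Int)) k = ((a : Int) == (k : Int)) := by
        simp [pvTgtEq, h1]
      rw [hstep', htgt, pv_getD_modify _ _ _ _ _ hk]
      by_cases hak : a = k
      · rw [if_pos hak, if_pos (by simp [hak])]; push_cast; omega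
      · rw [if_neg hak, if_neg (by simp [hak])]; push_cast; omega
    · by_cases h2 : pvBeatsB pairs (b : Int) (a : Int) = true
      · have hstep' : pvPairStep2 pairs ans ((a : Int), (b : Int)) = ans.modify b (· + 1) := by
          simp [pvPairStep2, h1, h2]
        have htgt : pvTgtEq pairs ((a : Int), (b : Int)) k = ((b : Int) == (k : Int)) := by
          simp [pvTgtEq, h1, h2]
        rw [hstep', htgt, pv_getD_modify _ _ _ _ _ hk]
        by_cases hbk : b = k
        · rw [if_pos hbk, if_pos (by simp [hbk])]; push_cast; omega
        · rw [if_neg hbk, if_neg (by simp [hbk])]; push_cast; omega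
      · have hstep' : pvPairStep2 pairs ans ((a : Int), (b : Int)) = ans := by
          simp [pvPairStep2, h1, h2]
        have htgt : pvTgtEq pairs ((a : Int), (b : Int)) k = false := by
          simp [pvTgtEq, h1, h2]
        rw [hstep', htgt, if_neg (by simp)]
        push_cast; omega

lemma pv_foldl_insert_getD (l : List (Int × String)) :
    ∀ (d : PySem.Dict String Int) (w : String),
      ((l.foldl (fun d p => d.insert p.2 p.1) d).getD w 0 = d.getD w 0 ∧ w ∉ l.map (·.2))
      ∨ (∃ p ∈ l, (l.foldl (fun d p => d.insert p.2 p.1) d).getD w 0 = p.1) := by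
  induction l with
  | nil => intro d w; left; simp
  | cons p t ih =>
    intro d w
    rcases ih (d.insert p.2 p.1) w with ⟨h1, h2⟩ | ⟨q, hq, hval⟩
    · by_cases hw : w = p.2
      · right
        refine ⟨p, List.mem_cons_self .., ?_⟩
        rw [List.foldl_cons, h1, hw, PySem.Dict.getD_insert_self]
      · left
        constructor
        · rw [List.foldl_cons, h1, PySem.Dict.getD_insert_of_ne _ _ _ hw]
        · simp only [List.map_cons, List.mem_cons]
          push Not
          exact ⟨hw, by simpa using h2⟩
    · right
      exact ⟨q, List.mem_cons_of_mem _ hq, by rw [List.foldl_cons]; exact hval⟩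

lemma pv_friendIdx_lt (friends : List String) (w : String) (hw : w ∈ friends) :
    ∃ k : Nat, k < friends.length ∧ (pvFriendIdx friends).getD w 0 = (k : Int) := by
  rcases pv_foldl_insert_getD (PySem.List.enumerate friends 0) PySem.Dict.empty w with
    ⟨_, h2⟩ | ⟨p, hp, hval⟩
  · exact absurd (by simpa [PySem.List.map_snd_enumerate] using hw) h2
  · rw [PySem.List.mem_enumerate_iff] at hp
    obtain ⟨k, hk, rfl⟩ := hp
    exact ⟨k, hk, by simpa using hval⟩

lemma pv_pairs_range (friends gifts : List String) (h : Pre_solution friends gifts) :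
    ∀ p ∈ pvPairsB (pvFriendIdx friends) gifts,
      ∃ a b : Nat, a < friends.length ∧ b < friends.length ∧ p = ((a : Int), (b : Int)) := by
  intro p hp
  rw [pvPairsB, List.mem_map] at hp
  obtain ⟨g, hg, rfl⟩ := hp
  obtain ⟨hlen, hmem⟩ := h.2 g hg
  obtain ⟨x, y, hxy⟩ := List.length_eq_two.mp hlen
  obtain ⟨a, ha, hva⟩ := pv_friendIdx_lt friends x (hmem x (by simp [hxy]))
  obtain ⟨b, hb, hvb⟩ := pv_friendIdx_lt friends y (hmem y (by simp [hxy]))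
  exact ⟨a, b, ha, hb, by simp [pvParseB, hxy, hva, hvb]⟩

lemma pv_gift_loop_eq (friends gifts : List String) (h : Pre_solution friends gifts)
    (st0 : List Int × List (List Int)) :
    gifts.foldl (pvGiftStepA (pvFriendIdx friends)) st0
      = (pvPairsB (pvFriendIdx friends) gifts).foldl pvGiftPairStep st0 := by
  rw [pvPairsB, List.foldl_map]
  apply PySem.List.foldl_congr_mem
  intro st g hg
  obtain ⟨hlen, _⟩ := h.2 g hg
  obtain ⟨x, y, hxy⟩ := List.length_eq_two.mp hlen
  simp [pvGiftStepA, pvParseB, pvGiftPairStep, hxy]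

lemma pv_gift_fold_spec (n : Nat) (ps : List (Int × Int))
    (hps : ∀ p ∈ ps, ∃ a b : Nat, a < n ∧ b < n ∧ p = ((a : Int), (b : Int))) :
    ∀ gp graph, gp.length = n → graph.length = n →
      (∀ i : Nat, i < n → (graph.getD i []).length = n) →
      (ps.foldl pvGiftPairStep (gp, graph)).1.length = n ∧
      (ps.foldl pvGiftPairStep (gp, graph)).2.length = n ∧
      (∀ i : Nat, i < n → ((ps.foldl pvGiftPairStep (gp, graph)).2.getD i []).length = n) ∧
      (∀ k : Nat, k < n →
        (ps.foldl pvGiftPairStep (gp, graph)).1.getD k 0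
          = gp.getD k 0 + (ps.countP (fun p => p.1 == (k : Int)) : Int)
              - (ps.countP (fun p => p.2 == (k : Int)) : Int)) ∧
      (∀ a b : Nat, a < n → b < n →
        ((ps.foldl pvGiftPairStep (gp, graph)).2.getD a []).getD b 0
          = (graph.getD a []).getD b 0 + (ps.countP (fun p => p == ((a : Int), (b : Int))) : Int)) := by
  induction ps with
  | nil =>
    intro gp graph h1 h2 h3
    simp only [List.foldl_nil]
    exact ⟨h1, h2, h3, fun k hk => by simp, fun a b _ _ => by simp⟩
  | cons p t ih =>
    intro gp graph hgp hgraph hrows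
    obtain ⟨a, b, ha, hb, rfl⟩ := hps p (List.mem_cons_self ..)
    have hht : ∀ q ∈ t, ∃ a b : Nat, a < n ∧ b < n ∧ q = ((a : Int), (b : Int)) :=
      fun q hq => hps q (List.mem_cons_of_mem _ hq)
    have hstep : pvGiftPairStep (gp, graph) ((a : Int), (b : Int))
        = ((gp.modify a (· + 1)).modify b (· - 1),
           graph.modify a (fun row => row.modify b (· + 1))) := by
      simp [pvGiftPairStep]
    have hgp' : ((gp.modify a (· + 1)).modify b (· - 1)).length = n := by simp [hgp]
    have hgraph' : (graph.modify a (fun row => row.modify b (· + 1))).length = n := by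
      simp [hgraph]
    have hrows' : ∀ i : Nat, i < n →
        ((graph.modify a (fun row => row.modify b (· + 1))).getD i []).length = n := by
      intro i hi
      rw [pv_getD_modify _ _ _ _ _ (by omega : i < graph.length)]
      split_ifs with hai
      · rw [List.length_modify]; exact hrows i hi
      · exact hrows i hi
    have ih' := ih hht ((gp.modify a (· + 1)).modify b (· - 1))
      (graph.modify a (fun row => row.modify b (· + 1))) hgp' hgraph' hrows'
    rw [List.foldl_cons, hstep]
    refine ⟨ih'.1, ih'.2.1, ih'.2.2.1, ?_, ?_⟩
    · intro k hk
      rw [ih'.2.2.2.1 k hk,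
          pv_getD_modify _ _ _ _ _ (by rw [List.length_modify]; omega : k < (gp.modify a (· + 1)).length),
          pv_getD_modify _ _ _ _ _ (by omega : k < gp.length)]
      simp only [List.countP_cons]
      have hc1 : (((a : Int), (b : Int)).1 == (k : Int)) = (a == k) := by simp
      have hc2 : (((a : Int), (b : Int)).2 == (k : Int)) = (b == k) := by simp
      rw [hc1, hc2]
      by_cases hak : a = k <;> by_cases hbk : b = k <;>
        simp [hak, hbk] <;> omega
    · intro a' b' ha' hb'
      rw [ih'.2.2.2.2 a' b' ha' hb',
          pv_getD_modify _ _ _ _ _ (by omega : a' < graph.length)]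
      simp only [List.countP_cons]
      by_cases haa : a = a'
      · subst haa
        rw [if_pos rfl, pv_getD_modify _ _ _ _ _ (by rw [hrows a ha] ; omega : b' < (graph.getD a []).length)]
        by_cases hbb : b = b'
        · subst hbb
          rw [if_pos rfl]
          simp
          omega
        · rw [if_neg hbb]
          have : (((a : Int), (b : Int)) == ((a : Int), (b' : Int))) = false := by
            simp [hbb]
          rw [this]
          simp
      · rw [if_neg haa]
        have : (((a : Int), (b : Int)) == ((a' : Int), (b' : Int))) = false := by
          simp [haa]
        rw [this]
        simp

lemma pv_beats_iff (pairs : List (Int × Int)) (i j : Int) :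
    pvBeatsB pairs i j = true ↔
      ((pairs.countP (fun p => p == (i, j)) : Int) > (pairs.countP (fun p => p == (j, i)) : Int)
        ∨ ((pairs.countP (fun p => p == (i, j)) : Int) = (pairs.countP (fun p => p == (j, i)) : Int)
            ∧ pvPointB pairs i > pvPointB pairs j)) := by
  simp only [pvBeatsB]
  split_ifs with h <;> simp [h]
  omega

lemma pv_pairStepA_eq (pairs : List (Int × Int)) (graph : List (List Int)) (gp : List Int)
    (a b : Nat)
    (hga : PySem.List.pyGetD (PySem.List.pyGetD graph (a : Int) []) (b : Int) 0
      = (pairs.countP (fun p => p == ((a : Int), (b : Int))) : Int))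
    (hgb : PySem.List.pyGetD (PySem.List.pyGetD graph (b : Int) []) (a : Int) 0
      = (pairs.countP (fun p => p == ((b : Int), (a : Int))) : Int))
    (hpa : PySem.List.pyGetD gp (a : Int) 0 = pvPointB pairs (a : Int))
    (hpb : PySem.List.pyGetD gp (b : Int) 0 = pvPointB pairs (b : Int))
    (ans : List Int) :
    pvPairStepA graph gp (a : Int) ans (b : Int) = pvPairStep2 pairs ans ((a : Int), (b : Int)) := by
  have hab := pv_beats_iff pairs (a : Int) (b : Int)
  have hba := pv_beats_iff pairs (b : Int) (a : Int)
  simp only [pvPairStepA, hga, hgb, hpa, hpb, Int.toNat_natCast]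
  split_ifs with h1 h2 h3 h4
  · have hb1 : pvBeatsB pairs (a : Int) (b : Int) = true := hab.mpr (Or.inl h1)
    simp [pvPairStep2, hb1]
  · have hb1 : pvBeatsB pairs (a : Int) (b : Int) = false := by
      rw [Bool.eq_false_iff, Ne, hab]; omega
    have hb2 : pvBeatsB pairs (b : Int) (a : Int) = true := hba.mpr (Or.inl h2)
    simp [pvPairStep2, hb1, hb2]
  · have hb1 : pvBeatsB pairs (a : Int) (b : Int) = true := hab.mpr (Or.inr ⟨by omega, h3⟩)
    simp [pvPairStep2, hb1]
  · have hb1 : pvBeatsB pairs (a : Int) (b : Int) = false := by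
      rw [Bool.eq_false_iff, Ne, hab]; omega
    have hb2 : pvBeatsB pairs (b : Int) (a : Int) = true := hba.mpr (Or.inr ⟨by omega, h4⟩)
    simp [pvPairStep2, hb1, hb2]
  · have hb1 : pvBeatsB pairs (a : Int) (b : Int) = false := by
      rw [Bool.eq_false_iff, Ne, hab]; omega
    have hb2 : pvBeatsB pairs (b : Int) (a : Int) = false := by
      rw [Bool.eq_false_iff, Ne, hba]; omega
    simp [pvPairStep2, hb1, hb2]

lemma pv_countP_or_disjoint {α : Type} (l : List α) (p q : α → Bool)
    (h : ∀ x ∈ l, ¬(p x = true ∧ q x = true)) :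
    l.countP (fun x => p x || q x) = l.countP p + l.countP q := by
  induction l with
  | nil => simp
  | cons x t ih =>
    simp only [List.countP_cons]
    rw [ih (fun y hy => h y (List.mem_cons_of_mem _ hy))]
    have := h x (List.mem_cons_self ..)
    cases hp : p x <;> cases hq : q x <;> simp_all <;> omega

lemma pv_sum_ite_single (l : List Int) (hl : l.Nodup) (c : Int) (hc : c ∈ l) (v : Nat) :
    (l.map (fun i => if i = c then v else 0)).sum = v := by
  induction l with
  | nil => simp at hc
  | cons x t ih =>
    simp only [List.map_cons, List.sum_cons]
    by_cases hxc : x = c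
    · subst hxc
      have hxt : x ∉ t := (List.nodup_cons.mp hl).1
      rw [if_pos rfl]
      have hz : (t.map (fun i => if i = x then v else 0)).sum = 0 := by
        apply List.sum_eq_zero
        intro y hy
        rw [List.mem_map] at hy
        obtain ⟨i, hi, rfl⟩ := hy
        rw [if_neg (fun h => hxt (by rw [← h]; exact hi))]
      omega
    · have hct : c ∈ t := by
        rcases List.mem_cons.mp hc with h | h
        · exact absurd h.symm hxc
        · exact h
      rw [if_neg hxc, ih (List.nodup_cons.mp hl).2 hct]
      omega

lemma pv_countP_eq_single (l : List Int) (hl : l.Nodup) (c : Int) (f : Int → Bool) :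
    l.countP (fun j => (j == c) && f j) = if c ∈ l ∧ f c = true then 1 else 0 := by
  induction l with
  | nil => simp
  | cons x t ih =>
    have hxt := (List.nodup_cons.mp hl).1
    rw [List.countP_cons, ih (List.nodup_cons.mp hl).2]
    by_cases hxc : x = c
    · subst hxc
      have hnt : ¬(x ∈ t ∧ f x = true) := fun h => hxt h.1
      rw [if_neg hnt]
      cases hf : f x <;> simp
    · have hhead : ((x == c) && f x) = false := by simp [hxc]
      rw [hhead]
      have hiff : (c ∈ x :: t ∧ f c = true) ↔ (c ∈ t ∧ f c = true) := by
        constructor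
        · rintro ⟨hm, hf⟩
          rcases List.mem_cons.mp hm with h | h
          · exact absurd h.symm hxc
          · exact ⟨h, hf⟩
        · rintro ⟨hm, hf⟩
          exact ⟨List.mem_cons_of_mem _ hm, hf⟩
      rw [if_congr hiff rfl rfl]
      simp

lemma pv_tgt_split (pairs : List (Int × Int)) (k : Nat) (i j : Int) :
    pvTgtEq pairs (i, j) k
      = (((i == (k : Int)) && pvBeatsB pairs i j) || ((j == (k : Int)) && pvBeatsB pairs j i)) := by
  simp only [pvTgtEq]
  by_cases h1 : pvBeatsB pairs i j = true
  · have h2 := pv_beats_excl pairs i j h1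
    simp [h1, h2]
  · by_cases h2 : pvBeatsB pairs j i = true
    · simp [Bool.eq_false_iff.mpr h1, h2]
    · simp [Bool.eq_false_iff.mpr h1, Bool.eq_false_iff.mpr h2]

lemma pv_count_tri (pairs : List (Int × Int)) (n k : Nat) (hk : k < n) :
    ((PySem.List.pyRange 0 (n : Int)).flatMap
        (fun i => (PySem.List.pyRange (i + 1) (n : Int)).map (fun j => (i, j)))).countP
      (fun p => pvTgtEq pairs p k)
      = (PySem.List.pyRange 0 (n : Int)).countP
          (fun j => j != (k : Int) && pvBeatsB pairs (k : Int) j) := by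
  have hA : ∀ i : Int,
      (PySem.List.pyRange (i + 1) (n : Int)).countP (fun j => pvTgtEq pairs (i, j) k)
        = (if i = (k : Int)
            then (PySem.List.pyRange ((k : Int) + 1) (n : Int)).countP
              (fun j => pvBeatsB pairs (k : Int) j) else 0)
          + (if (decide (i < (k : Int)) && pvBeatsB pairs (k : Int) i) = true then 1 else 0) := by
    intro i
    have hsplit : (PySem.List.pyRange (i + 1) (n : Int)).countP (fun j => pvTgtEq pairs (i, j) k)
        = (PySem.List.pyRange (i + 1) (n : Int)).countP (fun j => (i == (k : Int)) && pvBeatsB pairs i j)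
          + (PySem.List.pyRange (i + 1) (n : Int)).countP (fun j => (j == (k : Int)) && pvBeatsB pairs j i) := by
      rw [← pv_countP_or_disjoint]
      · exact List.countP_congr (fun j _ => by rw [pv_tgt_split])
      · intro j _ ⟨hp, hq⟩
        rw [Bool.and_eq_true] at hp hq
        have hik : i = (k : Int) := by simpa using hp.1
        have hjk : j = (k : Int) := by simpa using hq.1
        subst hik; subst hjk
        exact absurd (pv_beats_excl pairs _ _ hp.2) (by simp [hq.2])
    rw [hsplit, pv_countP_eq_single _ (PySem.List.nodup_pyRange_one _ _)]
    congr 1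
    · by_cases hik : i = (k : Int)
      · subst hik; rw [if_pos rfl]
        exact List.countP_congr (fun j _ => by simp)
      · rw [if_neg hik, List.countP_eq_zero.mpr]
        intro j _
        simp [hik]
    · by_cases hc : (k : Int) ∈ PySem.List.pyRange (i + 1) (n : Int) ∧ pvBeatsB pairs (k : Int) i = true
      · rw [if_pos hc, if_pos]
        rw [PySem.List.mem_pyRange_one] at hc
        simp only [Bool.and_eq_true, decide_eq_true_eq]
        exact ⟨by omega, hc.2⟩
      · rw [if_neg hc, if_neg]
        rw [PySem.List.mem_pyRange_one] at hc
        simp only [Bool.and_eq_true, decide_eq_true_eq]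
        rintro ⟨h1, h2⟩
        exact hc ⟨⟨by omega, by exact_mod_cast hk⟩, h2⟩
  rw [List.countP_flatMap]
  have hmap : ((PySem.List.pyRange 0 (n : Int)).map
      ((List.countP fun p => pvTgtEq pairs p k) ∘ fun i => (PySem.List.pyRange (i + 1) (n : Int)).map (fun j => (i, j))))
      = (PySem.List.pyRange 0 (n : Int)).map (fun i =>
          (if i = (k : Int)
            then (PySem.List.pyRange ((k : Int) + 1) (n : Int)).countP
              (fun j => pvBeatsB pairs (k : Int) j) else 0)
          + (if (decide (i < (k : Int)) && pvBeatsB pairs (k : Int) i) = true then 1 else 0)) := by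
    apply List.map_congr_left
    intro i _
    rw [Function.comp_apply, List.countP_map]
    rw [show ((fun p => pvTgtEq pairs p k) ∘ fun j => (i, j)) = fun j => pvTgtEq pairs (i, j) k from rfl]
    exact hA i
  have hS2 : List.countP (fun i => decide (i < (k : Int)) && pvBeatsB pairs (k : Int) i) (PySem.List.pyRange 0 (n : Int))
      = List.countP (fun i => pvBeatsB pairs (k : Int) i) (PySem.List.pyRange 0 (k : Int)) := by
    rw [PySem.List.pyRange_one_append 0 (k : Int) (n : Int) (by positivity) (by exact_mod_cast Nat.le_of_lt hk),
        List.countP_append]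
    have h1 : List.countP (fun i => decide (i < (k : Int)) && pvBeatsB pairs (k : Int) i) (PySem.List.pyRange 0 (k : Int))
        = List.countP (fun i => pvBeatsB pairs (k : Int) i) (PySem.List.pyRange 0 (k : Int)) := by
      apply List.countP_congr
      intro i hi
      rw [PySem.List.mem_pyRange_one] at hi
      simp [hi.2]
    have h2 : List.countP (fun i => decide (i < (k : Int)) && pvBeatsB pairs (k : Int) i) (PySem.List.pyRange (k : Int) (n : Int)) = 0 := by
      rw [List.countP_eq_zero]
      intro i hi
      rw [PySem.List.mem_pyRange_one] at hi
      simp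
      omega
    rw [h1, h2]
    omega
  have hmid : List.countP (fun j => j != (k : Int) && pvBeatsB pairs (k : Int) j) [(k : Int)] = 0 := by
    simp
  have hlow : List.countP (fun j => j != (k : Int) && pvBeatsB pairs (k : Int) j) (PySem.List.pyRange 0 (k : Int))
      = List.countP (fun i => pvBeatsB pairs (k : Int) i) (PySem.List.pyRange 0 (k : Int)) := by
    apply List.countP_congr
    intro j hj
    rw [PySem.List.mem_pyRange_one] at hj
    have hne : (j != (k : Int)) = true := by simp; omega
    simp [hne]
  have hhigh : List.countP (fun j => j != (k : Int) && pvBeatsB pairs (k : Int) j) (PySem.List.pyRange ((k : Int) + 1) (n : Int))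
      = List.countP (fun j => pvBeatsB pairs (k : Int) j) (PySem.List.pyRange ((k : Int) + 1) (n : Int)) := by
    apply List.countP_congr
    intro j hj
    rw [PySem.List.mem_pyRange_one] at hj
    have hne : (j != (k : Int)) = true := by simp; omega
    simp [hne]
  rw [hmap, List.sum_map_add,
      pv_sum_ite_single _ (PySem.List.nodup_pyRange_one _ _) _
        (PySem.List.mem_pyRange_one.mpr ⟨by positivity, by exact_mod_cast hk⟩),
      PySem.List.sum_map_ite_one_zero_nat, hS2]
  have hsplit1 : PySem.List.pyRange 0 (n : Int)
      = PySem.List.pyRange 0 (k : Int) ++ PySem.List.pyRange (k : Int) (n : Int) :=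
    PySem.List.pyRange_one_append 0 (k : Int) (n : Int) (by positivity) (by exact_mod_cast Nat.le_of_lt hk)
  have hsplit2 : PySem.List.pyRange (k : Int) (n : Int)
      = PySem.List.pyRange (k : Int) ((k : Int) + 1) ++ PySem.List.pyRange ((k : Int) + 1) (n : Int) :=
    PySem.List.pyRange_one_append (k : Int) ((k : Int) + 1) (n : Int) (by omega) (by exact_mod_cast hk)
  conv_rhs => rw [hsplit1, hsplit2]
  rw [List.countP_append, List.countP_append, PySem.List.pyRange_one_singleton, hmid, hlow, hhigh]
  omega

lemma pv_solution_eq (friends gifts : List String) (hpre : Pre_solution friends gifts) :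
    solution friends gifts = solution_alt friends gifts := by
  have hn0 : 0 < friends.length := List.length_pos_iff.mpr hpre.1
  set n := friends.length with hn
  set pairs := pvPairsB (pvFriendIdx friends) gifts with hpairs
  have hps := pv_pairs_range friends gifts hpre
  set st := pairs.foldl pvGiftPairStep
    (List.replicate n (0 : Int), List.replicate n (List.replicate n (0 : Int))) with hst
  have hrows0 : ∀ i : Nat, i < n →
      ((List.replicate n (List.replicate n (0 : Int))).getD i []).length = n := by
    intro i hi
    rw [List.getD_eq_getElem _ _ (by simpa using hi)]
    simp
  have hspec := pv_gift_fold_spec n pairs hps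
    (List.replicate n (0 : Int)) (List.replicate n (List.replicate n (0 : Int)))
    (by simp) (by simp) hrows0
  have hP : ∀ a : Nat, a < n → PySem.List.pyGetD st.1 (a : Int) 0 = pvPointB pairs (a : Int) := by
    intro a ha
    rw [PySem.List.pyGetD_natCast, hspec.2.2.2.1 a ha]
    rw [List.getD_eq_getElem _ _ (by simpa using ha)]
    simp [pvPointB]
  have hG : ∀ a b : Nat, a < n → b < n →
      PySem.List.pyGetD (PySem.List.pyGetD st.2 (a : Int) []) (b : Int) 0
        = (pairs.countP (fun p => p == ((a : Int), (b : Int))) : Int) := by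
    intro a b ha hb
    rw [PySem.List.pyGetD_natCast, PySem.List.pyGetD_natCast, hspec.2.2.2.2 a b ha hb]
    rw [show ((List.replicate n (List.replicate n (0 : Int))).getD a []) = List.replicate n (0 : Int) from by
          rw [List.getD_eq_getElem _ _ (by simpa using ha)]; simp,
        List.getD_eq_getElem _ _ (by simpa using hb)]
    simp
  have hstepeq : ∀ i ∈ PySem.List.pyRange 0 (n : Int), ∀ (ans : List Int),
      ∀ j ∈ PySem.List.pyRange (i + 1) (n : Int),
      pvPairStepA st.2 st.1 i ans j = pvPairStep2 pairs ans (i, j) := by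
    intro i hi ans j hj
    rw [PySem.List.mem_pyRange_one] at hi hj
    lift i to ℕ using hi.1 with a
    lift j to ℕ using (by omega) with b
    have ha : a < n := by exact_mod_cast hi.2
    have hb : b < n := by exact_mod_cast hj.2
    exact pv_pairStepA_eq pairs st.2 st.1 a b (hG a b ha hb) (hG b a hb ha) (hP a ha) (hP b hb) ans
  have hloop2 : (PySem.List.pyRange 0 (n : Int)).foldl
      (fun ans i => (PySem.List.pyRange (i + 1) (n : Int)).foldl (pvPairStepA st.2 st.1 i) ans)
      (List.replicate n (0 : Int))
      = ((PySem.List.pyRange 0 (n : Int)).flatMap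
          (fun i => (PySem.List.pyRange (i + 1) (n : Int)).map (fun j => (i, j)))).foldl
        (pvPairStep2 pairs) (List.replicate n (0 : Int)) := by
    rw [List.foldl_flatMap]
    apply PySem.List.foldl_congr_mem
    intro ans i hi
    rw [List.foldl_map]
    exact PySem.List.foldl_congr_mem _ _ _ _ (fun ans' j hj => hstepeq i hi ans' j hj)
  have hPmem : ∀ p ∈ ((PySem.List.pyRange 0 (n : Int)).flatMap
      (fun i => (PySem.List.pyRange (i + 1) (n : Int)).map (fun j => (i, j)))),
      ∃ a b : Nat, p = ((a : Int), (b : Int)) := by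
    intro p hp
    rw [List.mem_flatMap] at hp
    obtain ⟨i, hi, hp⟩ := hp
    rw [List.mem_map] at hp
    obtain ⟨j, hj, rfl⟩ := hp
    rw [PySem.List.mem_pyRange_one] at hi hj
    exact ⟨i.toNat, j.toNat,
      by rw [Int.toNat_of_nonneg (by omega), Int.toNat_of_nonneg (by omega)]⟩
  set P := (PySem.List.pyRange 0 (n : Int)).flatMap
      (fun i => (PySem.List.pyRange (i + 1) (n : Int)).map (fun j => (i, j))) with hPdef
  have hfold := fun (k : Nat) (hk : k < n) =>
    pv_step2_fold pairs P hPmem (List.replicate n (0 : Int)) k (by simpa using hk)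
  have hansF_len : (P.foldl (pvPairStep2 pairs) (List.replicate n (0 : Int))).length = n := by
    rw [(hfold 0 hn0).2]; simp
  have hlist : P.foldl (pvPairStep2 pairs) (List.replicate n (0 : Int))
      = (PySem.List.pyRange 0 (n : Int)).map
          (fun i => ((PySem.List.pyRange 0 (n : Int)).countP
            (fun j => j != i && pvBeatsB pairs i j) : Int)) := by
    apply List.ext_getElem
    · rw [hansF_len, List.length_map, PySem.List.length_pyRange_one]; omega
    · intro k h1 h2
      have hk : k < n := by rwa [hansF_len] at h1
      rw [List.getElem_map, PySem.List.getElem_pyRange_one]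
      rw [← List.getD_eq_getElem _ 0 h1, (hfold k hk).1, pv_count_tri pairs n k hk]
      rw [List.getD_eq_getElem _ _ (by simpa using hk)]
      simp
  simp only [solution, solution_alt]
  rw [← hn, pv_gift_loop_eq friends gifts hpre, ← hpairs, ← hst, hloop2, hlist]

-- ===== VERDICT (by name: the statement is the Claim_ definition above) =====
theorem solution_spec : Claim_equal_solution := by
  intro friends gifts _ hpre
  unfold Spec_solution
  exact pv_solution_eq friends gifts hpre
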